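-- pv_equiv track=rewrite | github.com/rishikantrajdeepak/EmbeddingBinaryTreeIntoHypercube | Convert_binary_string_to_sequence_for_1_caterpillar.py | convert_binary_string_to_sequence_for_1_caterpillar
-- ===== SOURCE A (Python) =====
-- def convert_binary_string_to_sequence_for_1_caterpillar(L):
--     seq=[]
--     n=len(L)
--     i=-1
--     j=0
--     while j<n-1:
--         if L[j]==1:
--             seq.append(j-i)
--             i=j
--         j+=1
--     seq.append(j-i)
--     return seq
-- ===== SOURCE B (Python) =====
-- def convert_binary_string_to_sequence_for_1_caterpillar(L):
--     # encode all entries but the last as a 0/1 string; the gaps between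
--     # breakpoints are exactly the lengths of the '1'-separated segments, +1
--     s = ''.join('1' if x == 1 else '0' for x in L[:-1])
--     return [len(seg) + 1 for seg in s.split('1')]
-- ===== Notes on version B (the rewrite author's own statement) =====
-- stated objective: alternative
-- what changed: Instead of A's stateful single pass that threads the previous 1-position and appends each gap as it goes, B encodes all but the last element as a '0'/'1' string, splits it on '1', and returns each segment's length plus one (a gap between breakpoints is exactly a run of non-1 entries plus one).
import Mathlib
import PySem

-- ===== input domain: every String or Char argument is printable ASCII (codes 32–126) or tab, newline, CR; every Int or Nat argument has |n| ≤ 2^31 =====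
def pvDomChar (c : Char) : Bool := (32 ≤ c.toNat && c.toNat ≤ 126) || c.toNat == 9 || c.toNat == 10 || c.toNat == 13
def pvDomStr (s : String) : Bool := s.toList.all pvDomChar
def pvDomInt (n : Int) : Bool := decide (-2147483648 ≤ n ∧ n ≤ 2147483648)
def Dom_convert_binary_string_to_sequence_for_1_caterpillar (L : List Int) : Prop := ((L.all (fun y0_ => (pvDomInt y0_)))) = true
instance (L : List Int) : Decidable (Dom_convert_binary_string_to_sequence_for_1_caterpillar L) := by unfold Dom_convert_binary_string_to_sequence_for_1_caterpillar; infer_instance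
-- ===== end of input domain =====

-- B rewrites A's stateful gap accumulator as run-lengths of a '1'-split string; equivalence of the return values is proved below.

-- ===== PORT A =====
-- A's while loop reads L[j] for j = 0 .. n-2 and threads (seq, i, j); the
-- obvious structural recursion consumes the list and stops when one element
-- remains (the last index is never tested, matching `while j < n-1`).
def pvALoop : List Int → List Int → Int → Int → List Int
  | [], seq, i, j => seq ++ [j - i]          -- loop never entered (n = 0)
  | [_], seq, i, j => seq ++ [j - i]         -- j = n-1: exit, final append
  | x :: y :: t, seq, i, j =>
    if x = 1 then pvALoop (y :: t) (seq ++ [j - i]) j (j + 1)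
    else pvALoop (y :: t) seq i (j + 1)

def convert_binary_string_to_sequence_for_1_caterpillar (L : List Int) : List Int :=
  pvALoop L [] (-1) 0

-- ===== PORT B =====
-- Source B: s = ''.join('1' if x==1 else '0' for x in L[:-1]); split s on '1'
-- (Python str.split with a separator keeps empty pieces; '' splits to ['']);
-- answer = segment lengths + 1.
def pvMarker (x : Int) : Char := if x = 1 then '1' else '0'

def pvSplit1 : List Char → List (List Char)
  | [] => [[]]
  | c :: t =>
    if c = '1' then [] :: pvSplit1 t
    else
      match pvSplit1 t with
      | [] => [[c]]                          -- unreachable: pvSplit1 never returns []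
      | seg :: rest => (c :: seg) :: rest

def convert_binary_string_to_sequence_for_1_caterpillar_alt (L : List Int) : List Int :=
  let s := (L.take (L.length - 1)).map pvMarker    -- L[:-1] encoded as chars
  (pvSplit1 s).map (fun seg => ((seg.length : Int) + 1))

-- ===== PRECONDITION & SPEC =====
def Spec_convert_binary_string_to_sequence_for_1_caterpillar (L : List Int) (out : List Int) : Prop := out = convert_binary_string_to_sequence_for_1_caterpillar_alt L
instance (L : List Int) (out : List Int) : Decidable (Spec_convert_binary_string_to_sequence_for_1_caterpillar L out) := by unfold Spec_convert_binary_string_to_sequence_for_1_caterpillar; infer_instance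

-- ===== CLAIM (what is proved, stated in full; the proofs are below) =====
def Claim_equal_convert_binary_string_to_sequence_for_1_caterpillar : Prop := ∀ (L : List Int), Dom_convert_binary_string_to_sequence_for_1_caterpillar L → Spec_convert_binary_string_to_sequence_for_1_caterpillar L (convert_binary_string_to_sequence_for_1_caterpillar L)

-- ===== LEMMAS AND PROOFS =====

-- Intermediate form: the gap list as a function of the distance c = j - i
-- since the last breakpoint.
def pvG : List Int → Int → List Int
  | [], c => [c]
  | [_], c => [c]
  | x :: y :: t, c => if x = 1 then c :: pvG (y :: t) 1 else pvG (y :: t) (c + 1)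

-- same form on the encoded character string
def pvGc : List Char → Int → List Int
  | [], c => [c]
  | ch :: t, c => if ch = '1' then c :: pvGc t 1 else pvGc t (c + 1)

theorem pvSplit1_ne_nil (s : List Char) : pvSplit1 s ≠ [] := by
  cases s with
  | nil => simp [pvSplit1]
  | cons c t =>
    simp only [pvSplit1]
    split
    · simp
    · cases h : pvSplit1 t <;> simp

-- A's loop unfolds to pvG, with c = j - i.
theorem pvALoop_eq_pvG (L : List Int) : ∀ seq i j,
    pvALoop L seq i j = seq ++ pvG L (j - i) := by
  induction L with
  | nil => intro seq i j; simp [pvALoop, pvG]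
  | cons x rest ih =>
    intro seq i j
    cases rest with
    | nil => simp [pvALoop, pvG]
    | cons y t =>
      simp only [pvALoop, pvG]
      by_cases hx : x = 1
      · simp only [hx, if_true, ih]
        have : (j : Int) + 1 - j = 1 := by ring
        rw [this]
        simp
      · simp only [hx, if_false, ih]
        have : (j : Int) + 1 - i = j - i + 1 := by ring
        rw [this]

-- run-length characterisation of pvSplit1: pvGc adds c-1 to the first piece
theorem pvGc_eq_split (s : List Char) : ∀ c : Int,
    pvGc s c = match pvSplit1 s with
      | [] => []
      | seg :: rest => ((seg.length : Int) + c) :: rest.map (fun g => ((g.length : Int) + 1)) := by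
  induction s with
  | nil => intro c; simp [pvGc, pvSplit1]
  | cons ch t ih =>
    intro c
    simp only [pvGc, pvSplit1]
    by_cases hc : ch = '1'
    · simp only [hc, if_true]
      rw [ih 1]
      cases h : pvSplit1 t with
      | nil => exact absurd h (pvSplit1_ne_nil t)
      | cons seg rest => simp
    · simp only [hc, if_false]
      rw [ih (c + 1)]
      cases h : pvSplit1 t with
      | nil => exact absurd h (pvSplit1_ne_nil t)
      | cons seg rest =>
        simp only [List.length_cons]
        push_cast
        ring_nf

-- pvG on the integer list equals pvGc on the encoded prefix L[:-1]
theorem pvG_eq_pvGc (L : List Int) : ∀ c : Int,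
    pvG L c = pvGc ((L.take (L.length - 1)).map pvMarker) c := by
  induction L with
  | nil => intro c; simp [pvG, pvGc]
  | cons x rest ih =>
    intro c
    cases rest with
    | nil => simp [pvG, pvGc]
    | cons y t =>
      have hlen : (x :: y :: t).length - 1 = (y :: t).length := by simp
      rw [hlen]
      have htake : (x :: y :: t).take (y :: t).length
          = x :: (y :: t).take ((y :: t).length - 1) := by
        simp [List.length_cons]
      rw [htake]
      simp only [List.map_cons, pvG, pvGc]
      by_cases hx : x = 1
      · simp only [hx, pvMarker, if_true, ih]
      · have hm : pvMarker x = '0' := by simp [pvMarker, hx]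
        simp only [hx, if_false, hm, ih]
        norm_num
        exact fun h => absurd h (by decide)

-- ===== VERDICT (by name: the statement is the Claim_ definition above) =====
theorem convert_binary_string_to_sequence_for_1_caterpillar_spec : Claim_equal_convert_binary_string_to_sequence_for_1_caterpillar := by
  intro L _
  unfold Spec_convert_binary_string_to_sequence_for_1_caterpillar
  unfold convert_binary_string_to_sequence_for_1_caterpillar
  unfold convert_binary_string_to_sequence_for_1_caterpillar_alt
  rw [pvALoop_eq_pvG, pvG_eq_pvGc, pvGc_eq_split]
  cases h : pvSplit1 ((L.take (L.length - 1)).map pvMarker) with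
  | nil => exact absurd h (pvSplit1_ne_nil _)
  | cons seg rest => simp only [h, List.map_cons]; norm_num
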